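-- pv_equiv track=rewrite | github.com/Dragonlele2000/color-coding | GNN改/Solve.py | solve
-- ===== SOURCE A (Python) =====
-- def get2(v_i, S, v, e, color, t):
--     if t[v_i][S] != -1:
--         return t[v_i][S], t
--     if S == (1 << color[v_i]):
--         t[v_i][S] = 1
--         return 1, t
--     if (S >> color[v_i]) % 2 != 1:
--         t[v_i][S] = 0
--         return 0, t
--     tempS = S - (1 << color[v_i])
--
--     t[v_i][S] = 0
--     for v_j in range(v):
--         if e[v_i][v_j] == 1:
--             a, t = get2(v_j, tempS, v, e, color, t)
--             if a >= 1:
--                 t[v_i][S] += a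
--     return t[v_i][S], t
--
-- def solve(v, color, e, k):
--     t = [[-1 for _ in range(1 << k)] for _ in range(v)]
--     y = []
--     positive = 0
--     for i in range(v):
--         # a,t = get(i, (1 << k) - 1, v, e, color,t)
--         a, t = get2(i, (1 << k) - 1, v, e, color, t)
--         y.append(a)
--         if a >= 1:
--             positive = 1
--
--     return y, positive
-- ===== SOURCE B (Python) =====
-- def solve(v, color, e, k):
--     # Bottom-up subset DP over color masks instead of memoized recursion.
--     if v <= 0:
--         return [], 0
--     size = 1 << k
--     dp = [[0] * v for _ in range(size)]
--     for i in range(v):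
--         c = color[i]
--         if c < k:
--             dp[1 << c][i] = 1
--     for S in range(size):
--         for i in range(v):
--             c = color[i]
--             if c < k and (S >> c) % 2 == 1 and S != (1 << c):
--                 sub = S - (1 << c)
--                 row = e[i]
--                 prev = dp[sub]
--                 dp[S][i] = sum(prev[u] for u in range(v) if row[u] == 1)
--     y = list(dp[size - 1])
--     positive = 1 if any(a >= 1 for a in y) else 0
--     return y, positive
-- ===== Notes on version B (the rewrite author's own statement) =====
-- stated objective: alternative
-- what changed: Replaced the recursive memoized get2 (top-down, threading a -1-initialized memo table through nested recursive calls) with an iterative bottom-up DP that fills a dp[mask][vertex] table over masks in increasing order and reads off the full-mask row.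
import Mathlib
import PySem

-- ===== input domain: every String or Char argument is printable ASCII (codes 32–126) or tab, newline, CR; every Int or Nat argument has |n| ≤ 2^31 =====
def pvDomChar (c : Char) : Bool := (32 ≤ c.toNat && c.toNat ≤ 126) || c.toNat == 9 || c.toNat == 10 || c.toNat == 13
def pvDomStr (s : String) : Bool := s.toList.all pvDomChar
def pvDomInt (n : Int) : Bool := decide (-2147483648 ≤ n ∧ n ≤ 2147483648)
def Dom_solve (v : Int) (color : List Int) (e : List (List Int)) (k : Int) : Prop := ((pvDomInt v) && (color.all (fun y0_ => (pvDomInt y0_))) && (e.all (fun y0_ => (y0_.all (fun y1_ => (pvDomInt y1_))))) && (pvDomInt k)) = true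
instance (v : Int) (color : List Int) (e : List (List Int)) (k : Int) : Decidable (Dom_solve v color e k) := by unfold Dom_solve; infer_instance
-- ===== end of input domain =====

-- B replaces A's memoized recursion (get2) by a bottom-up subset-DP table dp[mask][vertex]; equal return values on Pre_ (A mutates no argument: the shared memo table is local to solve).


-- ===== PORT A =====
-- table read t[i][M] with default d (indices are in range on every admitted input)
def tGet (d : Int) (t : List (List Int)) (i M : Nat) : Int := (t.getD i []).getD M d
-- table write t[i][M] = x
def tSet (t : List (List Int)) (i M : Nat) (x : Int) : List (List Int) :=
  t.set i ((t.getD i []).set M x)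

-- a bit set in S (Python '(S >> c) % 2 == 1') forces 2^c ≤ S, so tempS = S - 2^c < S: termination of get2
lemma sub_pow_lt {S c : Nat} (hb : (S >>> c) % 2 = 1) : S - 2 ^ c < S := by
  have h1 : 1 ≤ S >>> c := by
    rcases Nat.eq_zero_or_pos (S >>> c) with h | h
    · rw [h] at hb; simp at hb
    · exact h
  rw [Nat.shiftRight_eq_div_pow] at h1
  have hp : 0 < 2 ^ c := Nat.two_pow_pos c
  have h2 : 2 ^ c ≤ S := (Nat.one_le_div_iff hp).1 h1
  omega

-- literal port of get2 (masks are Nats: 0 ≤ S < 2^k on every call A makes inside Pre_)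
def aGet2 (v_i S : Nat) (v : Int) (e : List (List Int)) (color : List Int)
    (t : List (List Int)) : Int × List (List Int) :=
  if tGet (-1) t v_i S ≠ -1 then (tGet (-1) t v_i S, t)
  else
    let c := (color.getD v_i 0).toNat
    if S = 2 ^ c then (1, tSet t v_i S 1)
    else if hb : (S >>> c) % 2 ≠ 1 then (0, tSet t v_i S 0)
    else
      have hlt : S - 2 ^ c < S := sub_pow_lt (by omega)
      let tempS := S - 2 ^ c
      let t1 := tSet t v_i S 0
      let t2 := (List.range v.toNat).foldl (fun tt v_j =>
        if (e.getD v_i []).getD v_j 0 = 1 then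
          let r := aGet2 v_j tempS v e color tt
          if r.1 ≥ 1 then tSet r.2 v_i S (tGet (-1) r.2 v_i S + r.1) else r.2
        else tt) t1
      (tGet (-1) t2 v_i S, t2)
termination_by S

-- 2 ^ k.toNat is Python's 1 << k on Pre_ (there 0 ≤ k whenever 0 < v; for v ≤ 0 Python never evaluates the row)
def solve (v : Int) (color : List Int) (e : List (List Int)) (k : Int) : List Int × Int :=
  let size := 2 ^ k.toNat
  let t0 := (List.range v.toNat).map (fun _ => List.replicate size (-1 : Int))
  let res := (List.range v.toNat).foldl (fun (st : List Int × Int × List (List Int)) i =>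
      let r := aGet2 i (size - 1) v e color st.2.2
      (st.1 ++ [r.1], if r.1 ≥ 1 then 1 else st.2.1, r.2)) ([], 0, t0)
  (res.1, res.2.1)

-- ===== PORT B =====
-- literal port of Source B: bottom-up dp over masks in increasing order, dp[mask][vertex]
def solve_alt (v : Int) (color : List Int) (e : List (List Int)) (k : Int) : List Int × Int :=
  if v ≤ 0 then ([], 0)
  else
    let size := 2 ^ k.toNat
    let dp0 := List.replicate size (List.replicate v.toNat (0 : Int))
    let dp1 := (List.range v.toNat).foldl (fun dp i =>
        let c := color.getD i 0
        if c < k then tSet dp (2 ^ c.toNat) i 1 else dp) dp0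
    let dp2 := (List.range size).foldl (fun dp S =>
        (List.range v.toNat).foldl (fun dp i =>
          let c := color.getD i 0
          if c < k ∧ (S >>> c.toNat) % 2 = 1 ∧ S ≠ 2 ^ c.toNat then
            let sub := S - 2 ^ c.toNat
            let row := e.getD i []
            let prev := dp.getD sub []
            tSet dp S i (((List.range v.toNat).filter (fun u => row.getD u 0 = 1)).foldl
                (fun s u => s + prev.getD u 0) 0)
          else dp) dp) dp1
    let y := dp2.getD (size - 1) []
    (y, if y.any (fun a => decide (a ≥ 1)) then 1 else 0)

-- ===== PRECONDITION & SPEC =====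
-- Pre_ is exactly where the Python A returns: for 0 < v it needs 0 ≤ k (else '1 << k' raises),
-- color long enough and non-negative for the first v entries (else IndexError/negative-shift
-- ValueError), and, when 2 ≤ k, a full e-row of length ≥ v for every vertex of color < k
-- (get2 scans exactly those rows); for v ≤ 0 A returns ([], 0) unconditionally.
def Pre_solve (v : Int) (color : List Int) (e : List (List Int)) (k : Int) : Prop :=
  v ≤ 0 ∨ (0 ≤ k ∧ v.toNat ≤ color.length ∧ (∀ i < v.toNat, 0 ≤ color.getD i 0) ∧
    (2 ≤ k → ∀ i < v.toNat, color.getD i 0 < k → i < e.length ∧ v.toNat ≤ (e.getD i []).length))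
instance (v : Int) (color : List Int) (e : List (List Int)) (k : Int) : Decidable (Pre_solve v color e k) := by unfold Pre_solve; infer_instance
def pvWitness_solve : Int × List Int × List (List Int) × Int := (2, [0, 1], [[0, 1], [1, 0]], 2)
def Spec_solve (v : Int) (color : List Int) (e : List (List Int)) (k : Int) (out : List Int × Int) : Prop := out = solve_alt v color e k
instance (v : Int) (color : List Int) (e : List (List Int)) (k : Int) (out : List Int × Int) : Decidable (Spec_solve v color e k out) := by unfold Spec_solve; infer_instance

-- ===== CLAIM (what is proved, stated in full; the proofs are below) =====
def Claim_equal_solve : Prop := ∀ (v : Int) (color : List Int) (e : List (List Int)) (k : Int), Dom_solve v color e k → Pre_solve v color e k → Spec_solve v color e k (solve v color e k)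

-- ===== LEMMAS AND PROOFS =====

-- the mathematical count both programs compute: number of colorful paths of color set M ending at i
def gcnt (v : Int) (e : List (List Int)) (color : List Int) (i M : Nat) : Int :=
  let c := (color.getD i 0).toNat
  if M = 2 ^ c then 1
  else if hb : (M >>> c) % 2 ≠ 1 then 0
  else
    have hlt : M - 2 ^ c < M := sub_pow_lt (by omega)
    ((List.range v.toNat).map (fun j =>
      if (e.getD i []).getD j 0 = 1 then gcnt v e color j (M - 2 ^ c) else 0)).sum
termination_by M

lemma gcnt_nonneg (v : Int) (e : List (List Int)) (color : List Int) :
    ∀ M i, 0 ≤ gcnt v e color i M := by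
  intro M
  induction M using Nat.strong_induction_on with
  | _ M IH =>
    intro i
    rw [gcnt]
    split_ifs with h1 h2
    · norm_num
    · norm_num
    · refine List.sum_nonneg ?_
      intro a ha
      simp only [List.mem_map] at ha
      obtain ⟨j, _, rfl⟩ := ha
      split_ifs
      · exact IH _ (sub_pow_lt (by omega)) j
      · exact le_refl 0

lemma gcnt_eq_one (v : Int) (e : List (List Int)) (color : List Int) (i M : Nat)
    (h : M = 2 ^ (color.getD i 0).toNat) : gcnt v e color i M = 1 := by
  rw [gcnt]
  rw [if_pos h]

lemma gcnt_eq_zero (v : Int) (e : List (List Int)) (color : List Int) (i M : Nat)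
    (h1 : M ≠ 2 ^ (color.getD i 0).toNat) (h2 : (M >>> (color.getD i 0).toNat) % 2 ≠ 1) :
    gcnt v e color i M = 0 := by
  rw [gcnt]
  rw [if_neg h1, dif_pos h2]

lemma gcnt_eq_sum (v : Int) (e : List (List Int)) (color : List Int) (i M : Nat)
    (h1 : M ≠ 2 ^ (color.getD i 0).toNat) (h2 : (M >>> (color.getD i 0).toNat) % 2 = 1) :
    gcnt v e color i M =
      ((List.range v.toNat).map (fun j =>
        if (e.getD i []).getD j 0 = 1 then gcnt v e color j (M - 2 ^ (color.getD i 0).toNat) else 0)).sum := by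
  rw [gcnt]
  rw [if_neg h1, dif_neg (by omega : ¬ (M >>> (color.getD i 0).toNat) % 2 ≠ 1)]

def Sh (t : List (List Int)) (n sz : Nat) : Prop := t.length = n ∧ ∀ r ∈ t, r.length = sz

lemma getD_set_self {α : Type} (l : List α) (i : Nat) (a d : α) (hi : i < l.length) :
    (l.set i a).getD i d = a := by
  rw [List.getD_eq_getElem?_getD, List.getElem?_set_self hi]; rfl

lemma getD_set_ne {α : Type} (l : List α) {i j : Nat} (a d : α) (h : i ≠ j) :
    (l.set i a).getD j d = l.getD j d := by
  rw [List.getD_eq_getElem?_getD, List.getElem?_set_ne h, ← List.getD_eq_getElem?_getD]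

lemma getD_mem_row {t : List (List Int)} {n sz i : Nat} (h : Sh t n sz) (hi : i < n) :
    (t.getD i []).length = sz := by
  obtain ⟨h1, h2⟩ := h
  have hit : i < t.length := by omega
  rw [List.getD_eq_getElem?_getD, List.getElem?_eq_getElem hit]
  exact h2 _ (List.getElem_mem hit)

lemma tSet_sh {t : List (List Int)} {n sz i M : Nat} {x : Int} (h : Sh t n sz) :
    Sh (tSet t i M x) n sz := by
  obtain ⟨h1, h2⟩ := h
  by_cases hit : i < t.length
  · refine ⟨by simp [tSet, h1], ?_⟩
    intro r hr
    rcases List.mem_or_eq_of_mem_set hr with hr | rfl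
    · exact h2 r hr
    · rw [List.length_set]
      exact getD_mem_row ⟨h1, h2⟩ (by omega)
  · unfold tSet
    rw [List.set_eq_of_length_le (by omega)]
    exact ⟨h1, h2⟩

lemma tGet_tSet_same {d x : Int} {t : List (List Int)} {n sz i M : Nat}
    (h : Sh t n sz) (hi : i < n) (hM : M < sz) : tGet d (tSet t i M x) i M = x := by
  have hit : i < t.length := by rw [h.1]; omega
  have hrow : (t.getD i []).length = sz := getD_mem_row h hi
  unfold tGet tSet
  rw [getD_set_self _ _ _ _ hit, getD_set_self _ _ _ _ (by omega)]

lemma tGet_tSet_ne {d x : Int} {t : List (List Int)} {i M i' M' : Nat}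
    (h : i ≠ i' ∨ M ≠ M') : tGet d (tSet t i' M' x) i M = tGet d t i M := by
  unfold tGet tSet
  by_cases hii : i' = i
  · subst hii
    have hMM : M' ≠ M := by tauto
    by_cases hit : i' < t.length
    · rw [getD_set_self _ _ _ _ hit, getD_set_ne _ _ _ hMM]
    · rw [List.set_eq_of_length_le (by omega)]
  · rw [getD_set_ne _ _ _ hii]

-- every memo cell is untouched (-1) or already holds the true count, up to mask bound B
def Ok (v : Int) (e : List (List Int)) (color : List Int) (t : List (List Int)) (B : Nat) : Prop :=
  ∀ i M, M ≤ B → tGet (-1) t i M = -1 ∨ tGet (-1) t i M = gcnt v e color i M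

-- loop sub-lemma for port A: the for-v_j loop accumulates the neighbor sums into cell (i, S)
lemma aLoop_ok (v : Int) (e : List (List Int)) (color : List Int) (sz S tempS i : Nat)
    (hi : i < v.toNat) (hS : S < sz) (htS : tempS < S)
    (hrec : ∀ t, Sh t v.toNat sz → Ok v e color t tempS → ∀ j, j < v.toNat →
      (aGet2 j tempS v e color t).1 = gcnt v e color j tempS ∧
      Sh (aGet2 j tempS v e color t).2 v.toNat sz ∧
      Ok v e color (aGet2 j tempS v e color t).2 tempS ∧
      (∀ i' M', tempS < M' → tGet (-1) (aGet2 j tempS v e color t).2 i' M' = tGet (-1) t i' M')) :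
    ∀ (l : List Nat), (∀ j ∈ l, j < v.toNat) → ∀ (t : List (List Int)) (p : Int),
      Sh t v.toNat sz → Ok v e color t tempS → tGet (-1) t i S = p →
      tGet (-1) (l.foldl (fun tt v_j => if (e.getD i []).getD v_j 0 = 1 then
            let r := aGet2 v_j tempS v e color tt
            if r.1 ≥ 1 then tSet r.2 i S (tGet (-1) r.2 i S + r.1) else r.2
          else tt) t) i S
        = p + (l.map (fun j => if (e.getD i []).getD j 0 = 1 then gcnt v e color j tempS else 0)).sum ∧
      Sh (l.foldl (fun tt v_j => if (e.getD i []).getD v_j 0 = 1 then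
            let r := aGet2 v_j tempS v e color tt
            if r.1 ≥ 1 then tSet r.2 i S (tGet (-1) r.2 i S + r.1) else r.2
          else tt) t) v.toNat sz ∧
      Ok v e color (l.foldl (fun tt v_j => if (e.getD i []).getD v_j 0 = 1 then
            let r := aGet2 v_j tempS v e color tt
            if r.1 ≥ 1 then tSet r.2 i S (tGet (-1) r.2 i S + r.1) else r.2
          else tt) t) tempS ∧
      (∀ i' M', tempS < M' → ¬(i' = i ∧ M' = S) →
        tGet (-1) (l.foldl (fun tt v_j => if (e.getD i []).getD v_j 0 = 1 then
            let r := aGet2 v_j tempS v e color tt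
            if r.1 ≥ 1 then tSet r.2 i S (tGet (-1) r.2 i S + r.1) else r.2
          else tt) t) i' M' = tGet (-1) t i' M') := by
  intro l
  induction l with
  | nil => intro _ t p hSh hOk hp; simpa using ⟨hp, hSh, hOk⟩
  | cons j l' IHl =>
    intro hl t p hSh hOk hp
    have hj : j < v.toNat := hl j (by simp)
    rw [List.foldl_cons, List.map_cons, List.sum_cons]
    by_cases hej : (e.getD i []).getD j 0 = 1
    · simp only [if_pos hej]
      obtain ⟨hr1, hr2, hr3, hr4⟩ := hrec t hSh hOk j hj
      have hcell : tGet (-1) (aGet2 j tempS v e color t).2 i S = p := by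
        rw [hr4 i S htS]; exact hp
      by_cases hge : (aGet2 j tempS v e color t).1 ≥ 1
      · simp only [if_pos hge]
        have hSh' : Sh (tSet (aGet2 j tempS v e color t).2 i S
            (tGet (-1) (aGet2 j tempS v e color t).2 i S + (aGet2 j tempS v e color t).1)) v.toNat sz :=
          tSet_sh hr2
        have hOk' : Ok v e color (tSet (aGet2 j tempS v e color t).2 i S
            (tGet (-1) (aGet2 j tempS v e color t).2 i S + (aGet2 j tempS v e color t).1)) tempS := by
          intro i' M' hM'
          rw [tGet_tSet_ne (Or.inr (by omega))]
          exact hr3 i' M' hM'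
        have hp' : tGet (-1) (tSet (aGet2 j tempS v e color t).2 i S
            (tGet (-1) (aGet2 j tempS v e color t).2 i S + (aGet2 j tempS v e color t).1)) i S
            = p + gcnt v e color j tempS := by
          rw [tGet_tSet_same hr2 hi hS, hcell, hr1]
        obtain ⟨c1, c2, c3, c4⟩ := IHl (fun x hx => hl x (by simp [hx]))
          _ (p + gcnt v e color j tempS) hSh' hOk' hp'
        refine ⟨by rw [c1]; ring, c2, c3, ?_⟩
        intro i' M' hM' hne
        rw [c4 i' M' hM' hne, tGet_tSet_ne (by tauto), hr4 i' M' hM']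
      · simp only [if_neg hge]
        have hz : (aGet2 j tempS v e color t).1 = 0 := by
          have := gcnt_nonneg v e color tempS j
          omega
        have hg0 : gcnt v e color j tempS = 0 := by rw [← hr1, hz]
        obtain ⟨c1, c2, c3, c4⟩ := IHl (fun x hx => hl x (by simp [hx]))
          _ p hr2 hr3 hcell
        refine ⟨by rw [c1, hg0]; ring, c2, c3, ?_⟩
        intro i' M' hM' hne
        rw [c4 i' M' hM' hne, hr4 i' M' hM']
    · simp only [if_neg hej]
      obtain ⟨c1, c2, c3, c4⟩ := IHl (fun x hx => hl x (by simp [hx])) t p hSh hOk hp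
      refine ⟨by rw [c1]; ring, c2, c3, c4⟩

-- master lemma for port A: aGet2 returns the true count and preserves the memo invariant
lemma aGet2_ok (v : Int) (e : List (List Int)) (color : List Int) (sz : Nat) :
    ∀ S, S < sz → ∀ t, Sh t v.toNat sz → Ok v e color t S → ∀ i, i < v.toNat →
      (aGet2 i S v e color t).1 = gcnt v e color i S ∧
      Sh (aGet2 i S v e color t).2 v.toNat sz ∧
      Ok v e color (aGet2 i S v e color t).2 S ∧
      (∀ i' M', S < M' → tGet (-1) (aGet2 i S v e color t).2 i' M' = tGet (-1) t i' M') := by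
  intro S
  induction S using Nat.strong_induction_on with
  | _ S IH =>
    intro hS t hSh hOk i hi
    by_cases hmemo : tGet (-1) t i S ≠ -1
    · rw [aGet2]
      simp only [if_pos hmemo]
      rcases hOk i S (le_refl S) with h | h
      · exact absurd h hmemo
      · exact ⟨h, hSh, hOk, by simp⟩
    · by_cases hsing : S = 2 ^ (color.getD i 0).toNat
      · rw [aGet2]
        simp only [if_neg hmemo, if_pos hsing]
        refine ⟨(gcnt_eq_one v e color i S hsing).symm, tSet_sh hSh, ?_, ?_⟩
        · intro i' M' hM'
          by_cases hne : i' = i ∧ M' = S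
          · obtain ⟨rfl, rfl⟩ := hne
            rw [tGet_tSet_same hSh hi hS, gcnt_eq_one v e color i' M' hsing]
            exact Or.inr rfl
          · rw [tGet_tSet_ne (by tauto)]
            exact hOk i' M' hM'
        · intro i' M' hM'
          rw [tGet_tSet_ne (Or.inr (by omega))]
      · by_cases hbit : (S >>> (color.getD i 0).toNat) % 2 ≠ 1
        · rw [aGet2]
          simp only [if_neg hmemo, if_neg hsing, dif_pos hbit]
          refine ⟨(gcnt_eq_zero v e color i S hsing hbit).symm, tSet_sh hSh, ?_, ?_⟩
          · intro i' M' hM'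
            by_cases hne : i' = i ∧ M' = S
            · obtain ⟨rfl, rfl⟩ := hne
              rw [tGet_tSet_same hSh hi hS, gcnt_eq_zero v e color i' M' hsing hbit]
              exact Or.inr rfl
            · rw [tGet_tSet_ne (by tauto)]
              exact hOk i' M' hM'
          · intro i' M' hM'
            rw [tGet_tSet_ne (Or.inr (by omega))]
        · have hbit' : (S >>> (color.getD i 0).toNat) % 2 = 1 := by omega
          have htS : S - 2 ^ (color.getD i 0).toNat < S := sub_pow_lt hbit'
          have hSh1 : Sh (tSet t i S 0) v.toNat sz := tSet_sh hSh
          have hOk1 : Ok v e color (tSet t i S 0) (S - 2 ^ (color.getD i 0).toNat) := by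
            intro i' M' hM'
            rw [tGet_tSet_ne (Or.inr (by omega))]
            exact hOk i' M' (by omega)
          have hp1 : tGet (-1) (tSet t i S 0) i S = 0 := tGet_tSet_same hSh hi hS
          obtain ⟨c1, c2, c3, c4⟩ := aLoop_ok v e color sz S (S - 2 ^ (color.getD i 0).toNat) i
            hi hS htS
            (fun t' h1 h2 j hj => IH _ htS (by omega) t' h1 h2 j hj)
            (List.range v.toNat) (fun j hj => List.mem_range.1 hj)
            (tSet t i S 0) 0 hSh1 hOk1 hp1
          rw [aGet2]
          simp only [if_neg hmemo, if_neg hsing, dif_neg hbit]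
          refine ⟨?_, c2, ?_, ?_⟩
          · rw [c1, gcnt_eq_sum v e color i S hsing hbit']
            ring
          · intro i' M' hM'
            by_cases hne : i' = i ∧ M' = S
            · obtain ⟨rfl, rfl⟩ := hne
              right
              rw [c1, gcnt_eq_sum v e color i' M' hsing hbit']
              ring
            · by_cases hMt : M' ≤ S - 2 ^ (color.getD i 0).toNat
              · exact c3 i' M' hMt
              · rw [c4 i' M' (by omega) hne, tGet_tSet_ne (by tauto)]
                exact hOk i' M' hM'
          · intro i' M' hM'
            rw [c4 i' M' (by omega) (by omega), tGet_tSet_ne (Or.inr (by omega))]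

-- the top-level loop of solve: y collects gcnt values, positive is the any-flag
lemma solveA_loop (v : Int) (color : List Int) (e : List (List Int)) (sz : Nat) (hsz : 0 < sz) :
    ∀ (l : List Nat), (∀ j ∈ l, j < v.toNat) → ∀ (ys : List Int) (pos : Int) (t : List (List Int)),
      Sh t v.toNat sz → Ok v e color t (sz - 1) →
      (l.foldl (fun (st : List Int × Int × List (List Int)) i =>
          let r := aGet2 i (sz - 1) v e color st.2.2
          (st.1 ++ [r.1], if r.1 ≥ 1 then 1 else st.2.1, r.2)) (ys, pos, t)).1
        = ys ++ l.map (fun i => gcnt v e color i (sz - 1)) ∧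
      (l.foldl (fun (st : List Int × Int × List (List Int)) i =>
          let r := aGet2 i (sz - 1) v e color st.2.2
          (st.1 ++ [r.1], if r.1 ≥ 1 then 1 else st.2.1, r.2)) (ys, pos, t)).2.1
        = if l.any (fun i => decide (gcnt v e color i (sz - 1) ≥ 1)) then 1 else pos := by
  intro l
  induction l with
  | nil => intro _ ys pos t _ _; simp
  | cons j l' IHl =>
    intro hl ys pos t hSh hOk
    have hj : j < v.toNat := hl j (by simp)
    obtain ⟨r1, r2, r3, _⟩ := aGet2_ok v e color sz (sz - 1) (by omega) t hSh hOk j hj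
    rw [List.foldl_cons]
    simp only []
    obtain ⟨c1, c2⟩ := IHl (fun x hx => hl x (by simp [hx]))
      (ys ++ [(aGet2 j (sz - 1) v e color t).1])
      (if (aGet2 j (sz - 1) v e color t).1 ≥ 1 then 1 else pos)
      (aGet2 j (sz - 1) v e color t).2 r2 r3
    constructor
    · rw [c1, r1]
      simp
    · rw [c2, r1]
      by_cases hg : gcnt v e color j (sz - 1) ≥ 1
      · simp [hg]
      · simp [hg]

-- port A's solve computes y = map (gcnt · full) and the any-flag
lemma solveA_eval (v : Int) (color : List Int) (e : List (List Int)) (k : Int) :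
    solve v color e k =
      ((List.range v.toNat).map (fun i => gcnt v e color i (2 ^ k.toNat - 1)),
       if (List.range v.toNat).any (fun i => decide (gcnt v e color i (2 ^ k.toNat - 1) ≥ 1)) then 1 else 0) := by
  have hT0 : ∀ (n sz : Nat) (i M : Nat),
      tGet (-1) (List.replicate n (List.replicate sz (-1 : Int))) i M = -1 := by
    intro n sz i M
    unfold tGet
    by_cases hin : i < n
    · have hrow : (List.replicate n (List.replicate sz (-1 : Int))).getD i [] = List.replicate sz (-1 : Int) :=
        List.getD_replicate _ hin
      rw [hrow]
      by_cases hM : M < sz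
      · rw [List.getD_replicate _ hM]
      · have : sz ≤ M := by omega
        rw [List.getD_eq_getElem?_getD, List.getElem?_eq_none (by simpa using this)]
        rfl
    · have hrow : (List.replicate n (List.replicate sz (-1 : Int))).getD i [] = [] := by
        rw [List.getD_eq_getElem?_getD, List.getElem?_eq_none (by simpa using hin)]
        rfl
      rw [hrow]
      simp
  have hSh0 : Sh (List.replicate v.toNat (List.replicate (2 ^ k.toNat) (-1 : Int))) v.toNat (2 ^ k.toNat) := by
    refine ⟨by simp, ?_⟩
    intro r hr
    rw [List.eq_of_mem_replicate hr]
    simp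
  have hOk0 : Ok v e color (List.replicate v.toNat (List.replicate (2 ^ k.toNat) (-1 : Int))) (2 ^ k.toNat - 1) :=
    fun i M _ => Or.inl (hT0 _ _ i M)
  obtain ⟨c1, c2⟩ := solveA_loop v color e (2 ^ k.toNat) (Nat.two_pow_pos _)
    (List.range v.toNat) (fun j hj => List.mem_range.1 hj)
    [] 0 _ hSh0 hOk0
  have ht0 : (List.range v.toNat).map (fun _ => List.replicate (2 ^ k.toNat) (-1 : Int))
      = List.replicate v.toNat (List.replicate (2 ^ k.toNat) (-1 : Int)) := by
    rw [List.map_const']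
    simp
  simp only [solve]
  rw [ht0, c1, c2]
  simp

-- B-side abbreviations: the init-loop body, inner body, outer body, and the filled tables
def bInnerF (v : Int) (color : List Int) (e : List (List Int)) (k : Int) (S : Nat) :
    List (List Int) → Nat → List (List Int) := fun dp i =>
  let c := color.getD i 0
  if c < k ∧ (S >>> c.toNat) % 2 = 1 ∧ S ≠ 2 ^ c.toNat then
    let sub := S - 2 ^ c.toNat
    let row := e.getD i []
    let prev := dp.getD sub []
    tSet dp S i (((List.range v.toNat).filter (fun u => row.getD u 0 = 1)).foldl
        (fun s u => s + prev.getD u 0) 0)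
  else dp

def bOuterF (v : Int) (color : List Int) (e : List (List Int)) (k : Int) :
    List (List Int) → Nat → List (List Int) := fun dp S =>
  (List.range v.toNat).foldl (bInnerF v color e k S) dp

def bInitF (v : Int) (color : List Int) (k : Int) : List (List Int) → Nat → List (List Int) :=
  fun dp i =>
    let c := color.getD i 0
    if c < k then tSet dp (2 ^ c.toNat) i 1 else dp

def bInitTable (v : Int) (color : List Int) (k : Int) : List (List Int) :=
  (List.range v.toNat).foldl (bInitF v color k)
    (List.replicate (2 ^ k.toNat) (List.replicate v.toNat (0 : Int)))

-- solve_alt, rephrased through the named fold bodies (definitional)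
lemma solve_alt_eq_fold (v : Int) (color : List Int) (e : List (List Int)) (k : Int)
    (hv : ¬ v ≤ 0) :
    solve_alt v color e k =
      (((List.range (2 ^ k.toNat)).foldl (bOuterF v color e k) (bInitTable v color k)).getD
          (2 ^ k.toNat - 1) [],
       if (((List.range (2 ^ k.toNat)).foldl (bOuterF v color e k)
            (bInitTable v color k)).getD (2 ^ k.toNat - 1) []).any (fun a => decide (a ≥ 1))
       then 1 else 0) := by
  simp only [solve_alt, if_neg hv]
  rfl

-- the value every cell of a fresh all-x table reads
lemma tGet_replicate (x : Int) (n sz i M : Nat) :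
    tGet x (List.replicate n (List.replicate sz x)) i M = x := by
  unfold tGet
  have hrep : ∀ M' : Nat, (List.replicate sz x).getD M' x = x := by
    intro M'
    by_cases h : M' < sz
    · exact List.getD_replicate _ h
    · have : (List.replicate sz x)[M']? = none := List.getElem?_eq_none (by simpa using (by omega : sz ≤ M'))
      rw [List.getD_eq_getElem?_getD, this]
      rfl
  by_cases hin : i < n
  · have hrow : (List.replicate n (List.replicate sz x)).getD i [] = List.replicate sz x :=
      List.getD_replicate _ hin
    rw [hrow, hrep]
  · have hrow : (List.replicate n (List.replicate sz x)).getD i [] = [] := by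
      have : (List.replicate n (List.replicate sz x))[i]? = none := List.getElem?_eq_none (by simpa using (by omega : n ≤ i))
      rw [List.getD_eq_getElem?_getD, this]
      rfl
    rw [hrow]
    simp

-- folding a filtered list with + is summing the guarded map
lemma filter_foldl_sum (f : Nat → Int) (P : Nat → Bool) : ∀ (l : List Nat) (s : Int),
    (l.filter P).foldl (fun s u => s + f u) s = s + (l.map (fun u => if P u then f u else 0)).sum := by
  intro l
  induction l with
  | nil => simp
  | cons a l ih =>
    intro s
    by_cases h : P a
    · rw [List.filter_cons_of_pos h, List.foldl_cons, ih]
      simp [h]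
      ring
    · rw [List.filter_cons_of_neg (by simpa using h)]
      rw [ih]
      simp [h]

-- the singleton initialisation table
lemma bInit_ok (v : Int) (color : List Int) (k : Int) (hk : 0 ≤ k)
    (hc : ∀ i < v.toNat, 0 ≤ color.getD i 0) :
    ∀ (l : List Nat), (∀ j ∈ l, j < v.toNat) → ∀ dp, Sh dp (2 ^ k.toNat) v.toNat →
      Sh (l.foldl (bInitF v color k) dp) (2 ^ k.toNat) v.toNat ∧
      (∀ M i, M < 2 ^ k.toNat → i < v.toNat →
        tGet 0 (l.foldl (bInitF v color k) dp) M i =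
          if i ∈ l ∧ color.getD i 0 < k ∧ M = 2 ^ (color.getD i 0).toNat then 1
          else tGet 0 dp M i) := by
  intro l
  induction l with
  | nil => intro _ dp hSh; refine ⟨hSh, ?_⟩; intro M i _ _; simp
  | cons j l' ih =>
    intro hl dp hSh
    have hj : j < v.toNat := hl j (by simp)
    rw [List.foldl_cons]
    by_cases hcj : color.getD j 0 < k
    · have hbody : bInitF v color k dp j = tSet dp (2 ^ ((color.getD j 0).toNat)) j 1 := by
        simp only [bInitF]
        rw [if_pos hcj]
      rw [hbody]
      have hcj0 : 0 ≤ color.getD j 0 := hc j hj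
      have hmask : 2 ^ ((color.getD j 0).toNat) < 2 ^ k.toNat :=
        Nat.pow_lt_pow_right (by norm_num) (by omega)
      have hSh' : Sh (tSet dp (2 ^ ((color.getD j 0).toNat)) j 1) (2 ^ k.toNat) v.toNat :=
        tSet_sh hSh
      obtain ⟨sh2, val2⟩ := ih (fun x hx => hl x (by simp [hx])) _ hSh'
      refine ⟨sh2, ?_⟩
      intro M i hM hi
      rw [val2 M i hM hi]
      by_cases hil : i ∈ l' ∧ color.getD i 0 < k ∧ M = 2 ^ ((color.getD i 0).toNat)
      · rw [if_pos hil, if_pos ⟨by simp [hil.1], hil.2⟩]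
      · rw [if_neg hil]
        by_cases hij : i = j ∧ M = 2 ^ ((color.getD j 0).toNat)
        · obtain ⟨rfl, rfl⟩ := hij
          rw [tGet_tSet_same hSh hmask hi]
          rw [if_pos ⟨by simp, hcj, rfl⟩]
        · rw [tGet_tSet_ne (by tauto), if_neg ?_]
          intro ⟨h1, h2, h3⟩
          rcases List.mem_cons.1 h1 with rfl | h1'
          · exact hij ⟨rfl, h3⟩
          · exact hil ⟨h1', h2, h3⟩
    · have hbody : bInitF v color k dp j = dp := by
        simp only [bInitF]
        rw [if_neg hcj]
      rw [hbody]
      obtain ⟨sh2, val2⟩ := ih (fun x hx => hl x (by simp [hx])) dp hSh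
      refine ⟨sh2, ?_⟩
      intro M i hM hi
      rw [val2 M i hM hi]
      by_cases hil : i ∈ l' ∧ color.getD i 0 < k ∧ M = 2 ^ ((color.getD i 0).toNat)
      · rw [if_pos hil, if_pos ⟨by simp [hil.1], hil.2⟩]
      · rw [if_neg hil, if_neg ?_]
        intro ⟨h1, h2, h3⟩
        rcases List.mem_cons.1 h1 with rfl | h1'
        · exact hcj h2
        · exact hil ⟨h1', h2, h3⟩

-- the untouched init value is already the true count for every skipped cell
lemma bInit_eq_gcnt (v : Int) (e : List (List Int)) (color : List Int) (k : Int)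
    (hk : 0 ≤ k) (i M : Nat) (hc0 : 0 ≤ color.getD i 0) (hM : M < 2 ^ k.toNat)
    (hnq : ¬ (color.getD i 0 < k ∧ (M >>> (color.getD i 0).toNat) % 2 = 1 ∧ M ≠ 2 ^ ((color.getD i 0).toNat))) :
    (if color.getD i 0 < k ∧ M = 2 ^ ((color.getD i 0).toNat) then (1 : Int) else 0) = gcnt v e color i M := by
  by_cases h1 : color.getD i 0 < k
  · by_cases h2 : (M >>> (color.getD i 0).toNat) % 2 = 1
    · have h3 : M = 2 ^ ((color.getD i 0).toNat) := by tauto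
      rw [if_pos ⟨h1, h3⟩, gcnt_eq_one v e color i M h3]
    · have h3 : M ≠ 2 ^ ((color.getD i 0).toNat) := by
        intro hMe
        apply h2
        rw [hMe, Nat.shiftRight_eq_div_pow, Nat.div_self (Nat.two_pow_pos _)]
      rw [if_neg (by tauto), gcnt_eq_zero v e color i M h3 h2]
  · have hck : k.toNat ≤ (color.getD i 0).toNat := by omega
    have hle : 2 ^ k.toNat ≤ 2 ^ ((color.getD i 0).toNat) := Nat.pow_le_pow_right (by norm_num) hck
    have h3 : M ≠ 2 ^ ((color.getD i 0).toNat) := by omega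
    have h2 : (M >>> (color.getD i 0).toNat) % 2 ≠ 1 := by
      rw [Nat.shiftRight_eq_div_pow, Nat.div_eq_of_lt (by omega)]
      norm_num
    rw [if_neg (by tauto), gcnt_eq_zero v e color i M h3 h2]

-- one pass of the inner vertex loop at mask S
lemma bInner_ok (v : Int) (color : List Int) (e : List (List Int)) (k : Int) (S : Nat)
    (hS : S < 2 ^ k.toNat) :
    ∀ (l : List Nat), (∀ j ∈ l, j < v.toNat) → ∀ dp, Sh dp (2 ^ k.toNat) v.toNat →
      (∀ M u, M < S → u < v.toNat → tGet 0 dp M u = gcnt v e color u M) →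
      Sh (l.foldl (bInnerF v color e k S) dp) (2 ^ k.toNat) v.toNat ∧
      (∀ M i, M < 2 ^ k.toNat → i < v.toNat →
        tGet 0 (l.foldl (bInnerF v color e k S) dp) M i =
          if M = S ∧ i ∈ l ∧ color.getD i 0 < k ∧ (S >>> (color.getD i 0).toNat) % 2 = 1 ∧
              S ≠ 2 ^ ((color.getD i 0).toNat)
          then gcnt v e color i S else tGet 0 dp M i) := by
  intro l
  induction l with
  | nil => intro _ dp hSh _; refine ⟨hSh, ?_⟩; intro M i _ _; simp
  | cons j l' ih =>
    intro hl dp hSh hlow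
    have hj : j < v.toNat := hl j (by simp)
    rw [List.foldl_cons]
    by_cases hq : color.getD j 0 < k ∧ (S >>> (color.getD j 0).toNat) % 2 = 1 ∧
        S ≠ 2 ^ ((color.getD j 0).toNat)
    · have hsub : S - 2 ^ ((color.getD j 0).toNat) < S := sub_pow_lt hq.2.1
      have hval : ((List.range v.toNat).filter
            (fun u => decide ((e.getD j []).getD u 0 = 1))).foldl
            (fun s u => s + (dp.getD (S - 2 ^ ((color.getD j 0).toNat)) []).getD u 0) 0
          = gcnt v e color j S := by
        rw [filter_foldl_sum, gcnt_eq_sum v e color j S hq.2.2 hq.2.1]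
        rw [zero_add]
        refine congrArg List.sum ?_
        refine List.map_congr_left ?_
        intro u hu
        have hu' : u < v.toNat := List.mem_range.1 hu
        have hrd : (dp.getD (S - 2 ^ ((color.getD j 0).toNat)) []).getD u 0
            = gcnt v e color u (S - 2 ^ ((color.getD j 0).toNat)) :=
          hlow _ u hsub hu'
        rw [hrd]
        by_cases he : (e.getD j []).getD u 0 = 1
        · rw [if_pos (by simpa using he), if_pos he]
        · rw [if_neg (by simpa using he), if_neg he]
      have hbody : bInnerF v color e k S dp j = tSet dp S j (gcnt v e color j S) := by
        unfold bInnerF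
        rw [if_pos hq]
        exact congrArg (tSet dp S j) hval
      rw [hbody]
      have hSh' : Sh (tSet dp S j (gcnt v e color j S)) (2 ^ k.toNat) v.toNat := tSet_sh hSh
      have hlow' : ∀ M u, M < S → u < v.toNat →
          tGet 0 (tSet dp S j (gcnt v e color j S)) M u = gcnt v e color u M := by
        intro M u hM hu
        rw [tGet_tSet_ne (Or.inl (by omega))]
        exact hlow M u hM hu
      obtain ⟨sh2, val2⟩ := ih (fun x hx => hl x (by simp [hx])) _ hSh' hlow'
      refine ⟨sh2, ?_⟩
      intro M i hM hi
      rw [val2 M i hM hi]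
      by_cases hil : M = S ∧ i ∈ l' ∧ color.getD i 0 < k ∧
          (S >>> (color.getD i 0).toNat) % 2 = 1 ∧ S ≠ 2 ^ ((color.getD i 0).toNat)
      · rw [if_pos hil, if_pos ⟨hil.1, by simp [hil.2.1], hil.2.2⟩]
      · rw [if_neg hil]
        by_cases hij : M = S ∧ i = j
        · obtain ⟨rfl, rfl⟩ := hij
          rw [tGet_tSet_same hSh hS hi]
          rw [if_pos ⟨rfl, by simp, hq⟩]
        · rw [tGet_tSet_ne (by tauto), if_neg ?_]
          intro ⟨h1, h2, h3⟩
          rcases List.mem_cons.1 h2 with rfl | h2'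
          · exact hij ⟨h1, rfl⟩
          · exact hil ⟨h1, h2', h3⟩
    · have hbody : bInnerF v color e k S dp j = dp := by
        unfold bInnerF
        rw [if_neg hq]
      rw [hbody]
      obtain ⟨sh2, val2⟩ := ih (fun x hx => hl x (by simp [hx])) dp hSh hlow
      refine ⟨sh2, ?_⟩
      intro M i hM hi
      rw [val2 M i hM hi]
      by_cases hil : M = S ∧ i ∈ l' ∧ color.getD i 0 < k ∧
          (S >>> (color.getD i 0).toNat) % 2 = 1 ∧ S ≠ 2 ^ ((color.getD i 0).toNat)
      · rw [if_pos hil, if_pos ⟨hil.1, by simp [hil.2.1], hil.2.2⟩]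
      · rw [if_neg hil, if_neg ?_]
        intro ⟨h1, h2, h3⟩
        rcases List.mem_cons.1 h2 with rfl | h2'
        · exact hq h3
        · exact hil ⟨h1, h2', h3⟩

-- the outer mask loop, processed in increasing order, fills the whole table with gcnt
lemma bOuter_ok (v : Int) (color : List Int) (e : List (List Int)) (k : Int)
    (hk : 0 ≤ k) (hc : ∀ i < v.toNat, 0 ≤ color.getD i 0) :
    ∀ (m : Nat), m ≤ 2 ^ k.toNat →
      Sh ((List.range m).foldl (bOuterF v color e k) (bInitTable v color k)) (2 ^ k.toNat) v.toNat ∧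
      (∀ M i, M < 2 ^ k.toNat → i < v.toNat →
        tGet 0 ((List.range m).foldl (bOuterF v color e k) (bInitTable v color k)) M i =
          if M < m then gcnt v e color i M
          else if color.getD i 0 < k ∧ M = 2 ^ ((color.getD i 0).toNat) then 1 else 0) := by
  have hSh0 : Sh (List.replicate (2 ^ k.toNat) (List.replicate v.toNat (0 : Int)))
      (2 ^ k.toNat) v.toNat := by
    refine ⟨by simp, ?_⟩
    intro r hr
    rw [List.eq_of_mem_replicate hr]
    simp
  obtain ⟨sh1, val1⟩ := bInit_ok v color k hk hc (List.range v.toNat)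
    (fun j hj => List.mem_range.1 hj) _ hSh0
  have hinit : ∀ M i, M < 2 ^ k.toNat → i < v.toNat →
      tGet 0 (bInitTable v color k) M i =
        if color.getD i 0 < k ∧ M = 2 ^ ((color.getD i 0).toNat) then 1 else 0 := by
    intro M i hM hi
    unfold bInitTable
    rw [val1 M i hM hi, tGet_replicate]
    by_cases hq : color.getD i 0 < k ∧ M = 2 ^ ((color.getD i 0).toNat)
    · rw [if_pos ⟨List.mem_range.2 hi, hq⟩, if_pos hq]
    · rw [if_neg (by tauto), if_neg hq]
  intro m
  induction m with
  | zero =>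
    intro _
    refine ⟨sh1, ?_⟩
    intro M i hM hi
    simpa using hinit M i hM hi
  | succ m ihm =>
    intro hm
    obtain ⟨shm, valm⟩ := ihm (by omega)
    rw [List.range_succ, List.foldl_append, List.foldl_cons, List.foldl_nil]
    obtain ⟨shS, valS⟩ := bInner_ok v color e k m (by omega) (List.range v.toNat)
      (fun j hj => List.mem_range.1 hj) _ shm
      (by
        intro M u hM hu
        rw [valm M u (by omega) hu, if_pos hM])
    refine ⟨shS, ?_⟩
    intro M i hM hi
    rw [show bOuterF v color e k ((List.range m).foldl (bOuterF v color e k) (bInitTable v color k)) m =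
        (List.range v.toNat).foldl (bInnerF v color e k m)
        ((List.range m).foldl (bOuterF v color e k) (bInitTable v color k)) from rfl]
    rw [valS M i hM hi, valm M i hM hi]
    by_cases hMm : M = m
    · subst hMm
      by_cases hq : color.getD i 0 < k ∧ (M >>> (color.getD i 0).toNat) % 2 = 1 ∧
          M ≠ 2 ^ ((color.getD i 0).toNat)
      · rw [if_pos ⟨rfl, List.mem_range.2 hi, hq⟩, if_pos (show M < M + 1 by omega)]
      · rw [if_neg (fun h => hq h.2.2), if_neg (show ¬ M < M by omega),
            if_pos (show M < M + 1 by omega)]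
        exact bInit_eq_gcnt v e color k hk i M (hc i hi) hM hq
    · rw [if_neg (fun h => hMm h.1)]
      by_cases hMlt : M < m
      · rw [if_pos hMlt, if_pos (show M < m + 1 by omega)]
      · rw [if_neg hMlt, if_neg (show ¬ M < m + 1 by omega)]

-- port B's dp computes the same table bottom-up
lemma solveB_eval (v : Int) (color : List Int) (e : List (List Int)) (k : Int)
    (hv : ¬ v ≤ 0) (hk : 0 ≤ k) (hc : ∀ i < v.toNat, 0 ≤ color.getD i 0) :
    solve_alt v color e k =
      ((List.range v.toNat).map (fun i => gcnt v e color i (2 ^ k.toNat - 1)),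
       if (List.range v.toNat).any (fun i => decide (gcnt v e color i (2 ^ k.toNat - 1) ≥ 1)) then 1 else 0) := by
  have hsz : 0 < 2 ^ k.toNat := Nat.two_pow_pos _
  obtain ⟨d2sh, d2val⟩ := bOuter_ok v color e k hk hc (2 ^ k.toNat) (le_refl _)
  have hrowlen : (((List.range (2 ^ k.toNat)).foldl (bOuterF v color e k)
      (bInitTable v color k)).getD (2 ^ k.toNat - 1) []).length = v.toNat := by
    refine d2sh.2 _ ?_
    rw [List.getD_eq_getElem?_getD, List.getElem?_eq_getElem (by rw [d2sh.1]; omega)]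
    exact List.getElem_mem _
  have hy : ((List.range (2 ^ k.toNat)).foldl (bOuterF v color e k)
        (bInitTable v color k)).getD (2 ^ k.toNat - 1) []
      = (List.range v.toNat).map (fun i => gcnt v e color i (2 ^ k.toNat - 1)) := by
    refine List.ext_getElem (by rw [hrowlen]; simp) ?_
    intro i h1 h2
    have hi : i < v.toNat := by rw [hrowlen] at h1; exact h1
    have hval := d2val (2 ^ k.toNat - 1) i (by omega) hi
    rw [if_pos (by omega)] at hval
    have hL : (((List.range (2 ^ k.toNat)).foldl (bOuterF v color e k) (bInitTable v color k)).getD (2 ^ k.toNat - 1) [])[i]'h1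
        = tGet 0 ((List.range (2 ^ k.toNat)).foldl (bOuterF v color e k) (bInitTable v color k)) (2 ^ k.toNat - 1) i := by
      unfold tGet
      rw [List.getD_eq_getElem?_getD (l := ((List.range (2 ^ k.toNat)).foldl (bOuterF v color e k) (bInitTable v color k)).getD (2 ^ k.toNat - 1) [])]
      rw [List.getElem?_eq_getElem h1]
      rfl
    rw [hL, hval]
    simp
  rw [solve_alt_eq_fold v color e k hv, hy]
  congr 1
  rw [List.any_map]
  rfl

-- ===== VERDICT (by name: the statement is the Claim_ definition above) =====
theorem solve_spec : Claim_equal_solve := by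
  intro v color e k _hDom hPre
  unfold Spec_solve
  by_cases hv : v ≤ 0
  · have hn : v.toNat = 0 := Int.toNat_of_nonpos hv
    simp [solve, solve_alt, hv, hn]
  · rcases hPre with h | ⟨hk, _hlen, hc, _he⟩
    · exact absurd h hv
    · rw [solveA_eval, solveB_eval v color e k hv hk hc]
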